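-- pv_equiv track=rewrite | github.com/Neproxx/ID2223-LikeItOrNot | utils/training.py | map_predictions_to_success
-- ===== SOURCE A (Python) =====
-- def map_predictions_to_success(predictions):
--     """
--     Maps predictions into categories of
--     - "no success" = 0-10 likes,
--     - "mild success" = 11-100 likes,
--     - "great success" = 101-1000 likes,
--     - "huge success" = 1000+ likes
--     that correspond to the integers 0-3
--     """
--     success = []
--     for i in range(len(predictions)):
--         if predictions[i] < 11:
--             success.append(0)
--         elif predictions[i] < 101:
--             success.append(1)
--         elif predictions[i] < 1001:
--             success.append(2)
--         else:
--             success.append(3)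
--     return success
-- ===== SOURCE B (Python) =====
-- def map_predictions_to_success(predictions):
--     """Bucket each prediction as the number of thresholds it reaches."""
--     return [sum(p >= t for t in (11, 101, 1001)) for p in predictions]
-- ===== Notes on version B (the rewrite author's own statement) =====
-- stated objective: idiomatic
-- what changed: Replaces the index loop with a four-way branch chain and accumulator appends by a single comprehension that computes each bucket as a reduction over the ascending threshold table: the count of thresholds the prediction reaches.
import Mathlib
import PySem

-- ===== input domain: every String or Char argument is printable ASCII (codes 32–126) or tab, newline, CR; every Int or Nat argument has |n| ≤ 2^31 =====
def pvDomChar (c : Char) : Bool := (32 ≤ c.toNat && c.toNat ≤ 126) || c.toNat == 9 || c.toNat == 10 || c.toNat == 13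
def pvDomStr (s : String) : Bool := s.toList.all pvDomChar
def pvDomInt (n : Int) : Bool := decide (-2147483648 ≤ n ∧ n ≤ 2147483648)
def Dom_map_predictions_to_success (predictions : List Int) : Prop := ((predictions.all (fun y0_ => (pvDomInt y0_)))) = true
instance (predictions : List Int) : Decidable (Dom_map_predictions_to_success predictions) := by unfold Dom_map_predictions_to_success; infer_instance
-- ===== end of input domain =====

-- B replaces A's index loop with branch chain by a per-element count of thresholds reached (idiomatic, same cost).

-- ===== PORT A =====
-- index loop over range(len(predictions)), branch chain, appending to an accumulator
def map_predictions_to_success (predictions : List Int) : List Int :=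
  (PySem.List.pyRange 0 predictions.length 1).foldl
    (fun success i =>
      let p := PySem.List.pyGetD predictions i 0   -- predictions[i], i always in range
      if p < 11 then success ++ [0]
      else if p < 101 then success ++ [1]
      else if p < 1001 then success ++ [2]
      else success ++ [3]) []

-- ===== PORT B =====
-- comprehension: each bucket is sum(p >= t for t in (11, 101, 1001))
def map_predictions_to_success_alt (predictions : List Int) : List Int :=
  predictions.map (fun p =>
    ([(11 : Int), 101, 1001].map (fun t => if p ≥ t then (1 : Int) else 0)).sum)

-- ===== PRECONDITION & SPEC =====
def Spec_map_predictions_to_success (predictions : List Int) (out : List Int) : Prop := out = map_predictions_to_success_alt predictions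
instance (predictions : List Int) (out : List Int) : Decidable (Spec_map_predictions_to_success predictions out) := by unfold Spec_map_predictions_to_success; infer_instance

-- ===== CLAIM (what is proved, stated in full; the proofs are below) =====
def Claim_equal_map_predictions_to_success : Prop := ∀ (predictions : List Int), Dom_map_predictions_to_success predictions → Spec_map_predictions_to_success predictions (map_predictions_to_success predictions)

-- ===== LEMMAS AND PROOFS =====

-- the per-element bucket values agree
lemma pv_bucket (p : Int) :
    (if p < 11 then ([0] : List Int)
     else if p < 101 then [1] else if p < 1001 then [2] else [3])
      = [([(11 : Int), 101, 1001].map (fun t => if p ≥ t then (1 : Int) else 0)).sum] := by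
  simp only [List.map, List.sum_cons, List.sum_nil]
  split_ifs <;> simp <;> omega

lemma pv_foldl_acc (l acc : List Int) :
    l.foldl (fun success p =>
      if p < 11 then success ++ [0]
      else if p < 101 then success ++ [1]
      else if p < 1001 then success ++ [2]
      else success ++ [3]) acc
    = acc ++ map_predictions_to_success_alt l := by
  induction l generalizing acc with
  | nil => simp [map_predictions_to_success_alt]
  | cons p l ih =>
      rw [List.foldl_cons,
        show (if p < 11 then acc ++ [0]
              else if p < 101 then acc ++ [1]
              else if p < 1001 then acc ++ [2] else acc ++ [3])
          = acc ++ (if p < 11 then ([0] : List Int)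
              else if p < 101 then [1] else if p < 1001 then [2] else [3]) by
          split_ifs <;> rfl,
        ih, pv_bucket p]
      simp [map_predictions_to_success_alt]

-- ===== VERDICT (by name: the statement is the Claim_ definition above) =====
theorem map_predictions_to_success_spec : Claim_equal_map_predictions_to_success := by
  intro predictions _
  unfold Spec_map_predictions_to_success map_predictions_to_success
  rw [show (predictions.length : Int) = PySem.List.len predictions from rfl] at *
  rw [PySem.List.foldl_pyRange_zero_pyGetD predictions 0
        (fun success p =>
          if p < 11 then success ++ [0]
          else if p < 101 then success ++ [1]
          else if p < 1001 then success ++ [2]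
          else success ++ [3]) []]
  simpa using pv_foldl_acc predictions []
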